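-- pv_equiv track=rewrite | github.com/vishnutilak/Daily-code-challenge--fCC.org | Re: Fwd: Fw: Count.py | email_chain_count
-- ===== SOURCE A (Python) =====
-- def email_chain_count(subject):
--     subject = subject.lower()
--
--     count= 0
--     i= 0
--     s= len(subject)
--     while i<s:
--         if subject.startswith("fw:",i):
--             count+=1
--             i+=3
--         elif subject.startswith("fwd:",i):
--             count+=1
--             i+=4
--         elif subject.startswith("re:",i):
--             count+=1
--             i+=3
--         else:
--             i+=1
--     return count
-- ===== SOURCE B (Python) =====
-- def email_chain_count(subject):
--     s = subject.lower()
--     return s.count("fw:") + s.count("fwd:") + s.count("re:")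
-- ===== Notes on version B (the rewrite author's own statement) =====
-- stated objective: simpler
-- what changed: Replaces the manual index-pointer scanning loop with a one-line sum of three independent non-overlapping substring counts on the lowercased subject, relying on the three prefixes being mutually non-overlapping.
import Mathlib
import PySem

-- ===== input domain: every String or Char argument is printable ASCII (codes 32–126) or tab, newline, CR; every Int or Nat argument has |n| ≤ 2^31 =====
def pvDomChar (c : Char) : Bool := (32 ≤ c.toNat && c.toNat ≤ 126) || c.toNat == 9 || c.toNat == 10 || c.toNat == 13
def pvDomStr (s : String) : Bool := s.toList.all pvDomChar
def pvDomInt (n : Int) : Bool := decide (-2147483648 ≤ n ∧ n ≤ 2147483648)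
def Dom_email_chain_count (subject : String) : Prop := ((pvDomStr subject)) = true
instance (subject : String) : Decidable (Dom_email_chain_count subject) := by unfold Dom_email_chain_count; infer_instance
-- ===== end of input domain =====

-- B replaces A's manual index-pointer scanning loop by the sum of three independent
-- non-overlapping substring counts on the lowercased subject (objective: simpler).

-- ===== PORT A =====
-- A's while loop over index i, consuming 3/4/3 characters on a match and 1 otherwise,
-- as the obvious structural recursion on the remaining character list with the `count` accumulator.
def pvEmailLoop : List Char → Int → Int
  | [], count => count
  | c :: t, count =>
    if PySem.Chars.startswith (c :: t) ['f', 'w', ':'] then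
      pvEmailLoop ((c :: t).drop 3) (count + 1)
    else if PySem.Chars.startswith (c :: t) ['f', 'w', 'd', ':'] then
      pvEmailLoop ((c :: t).drop 4) (count + 1)
    else if PySem.Chars.startswith (c :: t) ['r', 'e', ':'] then
      pvEmailLoop ((c :: t).drop 3) (count + 1)
    else
      pvEmailLoop t count
termination_by l _ => l.length
decreasing_by all_goals simp

def email_chain_count (subject : String) : Int :=
  pvEmailLoop (PySem.Str.lower subject).toList 0

-- ===== PORT B =====
def email_chain_count_alt (subject : String) : Int :=
  let s := PySem.Str.lower subject
  (PySem.Str.count s "fw:" : Int) + (PySem.Str.count s "fwd:" : Int) + (PySem.Str.count s "re:" : Int)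

-- ===== PRECONDITION & SPEC =====
def Spec_email_chain_count (subject : String) (out : Int) : Prop := out = email_chain_count_alt subject
instance (subject : String) (out : Int) : Decidable (Spec_email_chain_count subject out) := by unfold Spec_email_chain_count; infer_instance

-- ===== CLAIM (what is proved, stated in full; the proofs are below) =====
def Claim_equal_email_chain_count : Prop := ∀ (subject : String), Dom_email_chain_count subject → Spec_email_chain_count subject (email_chain_count subject)

-- ===== LEMMAS AND PROOFS =====

-- The accumulator of `PySem.Chars.count.go` is additive.
theorem pv_go_acc (sub : List Char) (fuel : Nat) (l : List Char) (acc : Nat) :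
    PySem.Chars.count.go sub fuel l acc = acc + PySem.Chars.count.go sub fuel l 0 := by
  induction fuel generalizing l acc with
  | zero => simp [PySem.Chars.count.go]
  | succ n ih =>
    cases l with
    | nil => simp [PySem.Chars.count.go]
    | cons h t =>
      simp only [PySem.Chars.count.go]
      split
      · rw [ih _ (acc + 1), ih _ 1]; omega
      · exact ih t acc

-- Any fuel at least the length of the list gives the same result.
theorem pv_go_fuel (sub : List Char) (hsub : sub ≠ []) :
    ∀ (f₁ : Nat) (f₂ : Nat) (l : List Char) (acc : Nat), l.length ≤ f₁ → l.length ≤ f₂ →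
      PySem.Chars.count.go sub f₁ l acc = PySem.Chars.count.go sub f₂ l acc := by
  intro f₁
  induction f₁ with
  | zero =>
    intro f₂ l acc h1 _
    have : l = [] := by cases l <;> simp_all
    subst this
    cases f₂ <;> simp [PySem.Chars.count.go]
  | succ n ih =>
    intro f₂ l acc h1 h2
    cases l with
    | nil => cases f₂ <;> simp [PySem.Chars.count.go]
    | cons h t =>
      cases f₂ with
      | zero => simp at h2
      | succ m =>
        simp only [PySem.Chars.count.go]
        split
        · rename_i hpre
          have hlen : sub.length ≤ (h :: t).length := List.IsPrefix.length_le (List.isPrefixOf_iff_prefix.mp hpre)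
          have hs1 : 1 ≤ sub.length := by cases sub <;> simp_all
          apply ih
          · simp at h1 ⊢; omega
          · simp at h2 ⊢; omega
        · apply ih <;> simp_all

-- Step lemmas characterising Python's non-overlapping substring count.
theorem pv_count_nil (sub : List Char) (hsub : sub ≠ []) :
    PySem.Chars.count [] sub = 0 := by
  cases sub <;> simp_all [PySem.Chars.count, PySem.Chars.count.go]

theorem pv_count_cons_prefix (sub : List Char) (hsub : sub ≠ []) (c : Char) (t : List Char)
    (hpre : sub.isPrefixOf (c :: t) = true) :
    PySem.Chars.count (c :: t) sub = PySem.Chars.count ((c :: t).drop sub.length) sub + 1 := by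
  have hs1 : 1 ≤ sub.length := by cases sub <;> simp_all
  have hlen : sub.length ≤ (c :: t).length := List.IsPrefix.length_le (List.isPrefixOf_iff_prefix.mp hpre)
  have hE : sub.isEmpty = false := by cases sub <;> simp_all
  simp only [PySem.Chars.count, hE, Bool.false_eq_true, if_false]
  have hdl : ((c :: t).drop sub.length).length ≤ t.length := by simp; omega
  calc PySem.Chars.count.go sub (c :: t).length (c :: t) 0
      = PySem.Chars.count.go sub ((c :: t).drop sub.length).length ((c :: t).drop sub.length) 1 := by
        simp only [List.length_cons, PySem.Chars.count.go, hpre, if_true]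
        exact pv_go_fuel sub hsub _ _ _ _ (by simp at hdl ⊢; omega) (le_refl _)
    _ = PySem.Chars.count.go sub ((c :: t).drop sub.length).length ((c :: t).drop sub.length) 0 + 1 := by
        rw [pv_go_acc]; omega

theorem pv_count_cons_not_prefix (sub : List Char) (hsub : sub ≠ []) (c : Char) (t : List Char)
    (hpre : sub.isPrefixOf (c :: t) ≠ true) :
    PySem.Chars.count (c :: t) sub = PySem.Chars.count t sub := by
  have hE : sub.isEmpty = false := by cases sub <;> simp_all
  have hpre' : sub.isPrefixOf (c :: t) = false := Bool.eq_false_iff.mpr hpre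
  simp only [PySem.Chars.count, hE, Bool.false_eq_true, if_false]
  simp only [List.length_cons, PySem.Chars.count.go, hpre', Bool.false_eq_true, if_false]

-- A's interleaved scan equals the sum of the three per-pattern non-overlapping counts.
theorem pv_loop_eq (l : List Char) (acc : Int) :
    pvEmailLoop l acc =
      acc + ((PySem.Chars.count l ['f', 'w', ':'] : Int)
           + (PySem.Chars.count l ['f', 'w', 'd', ':'] : Int)
           + (PySem.Chars.count l ['r', 'e', ':'] : Int)) := by
  fun_induction pvEmailLoop l acc with
  | case1 count => simp [pv_count_nil]
  | case2 c t count hfw ih =>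
    simp only [PySem.Chars.startswith] at hfw
    obtain ⟨r, hr⟩ := List.isPrefixOf_iff_prefix.mp hfw
    rw [ih]
    rw [pv_count_cons_prefix ['f', 'w', ':'] (by simp) c t hfw]
    have hcw : c = 'f' ∧ t = 'w' :: ':' :: r := by
      have := hr.symm; simp at this; tauto
    obtain ⟨rfl, rfl⟩ := hcw
    rw [pv_count_cons_not_prefix ['f', 'w', 'd', ':'] (by simp) _ _ (by simp [List.isPrefixOf]),
        pv_count_cons_not_prefix ['f', 'w', 'd', ':'] (by simp) _ _ (by simp [List.isPrefixOf]),
        pv_count_cons_not_prefix ['f', 'w', 'd', ':'] (by simp) _ _ (by simp [List.isPrefixOf]),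
        pv_count_cons_not_prefix ['r', 'e', ':'] (by simp) _ _ (by simp [List.isPrefixOf]),
        pv_count_cons_not_prefix ['r', 'e', ':'] (by simp) _ _ (by simp [List.isPrefixOf]),
        pv_count_cons_not_prefix ['r', 'e', ':'] (by simp) _ _ (by simp [List.isPrefixOf])]
    have h3 : ('f' :: 'w' :: ':' :: r).drop 3 = r := rfl
    have hd : List.drop (['f', 'w', ':'].length) ('f' :: 'w' :: ':' :: r) = r := rfl
    rw [h3, hd]
    push_cast
    ring
  | case3 c t count hfw hfwd ih =>
    simp only [PySem.Chars.startswith] at hfw hfwd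
    obtain ⟨r, hr⟩ := List.isPrefixOf_iff_prefix.mp hfwd
    rw [ih]
    rw [pv_count_cons_prefix ['f', 'w', 'd', ':'] (by simp) c t hfwd]
    have hcw : c = 'f' ∧ t = 'w' :: 'd' :: ':' :: r := by
      have := hr.symm; simp at this; tauto
    obtain ⟨rfl, rfl⟩ := hcw
    rw [pv_count_cons_not_prefix ['f', 'w', ':'] (by simp) _ _ (by simp [List.isPrefixOf]),
        pv_count_cons_not_prefix ['f', 'w', ':'] (by simp) _ _ (by simp [List.isPrefixOf]),
        pv_count_cons_not_prefix ['f', 'w', ':'] (by simp) _ _ (by simp [List.isPrefixOf]),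
        pv_count_cons_not_prefix ['f', 'w', ':'] (by simp) _ _ (by simp [List.isPrefixOf]),
        pv_count_cons_not_prefix ['r', 'e', ':'] (by simp) _ _ (by simp [List.isPrefixOf]),
        pv_count_cons_not_prefix ['r', 'e', ':'] (by simp) _ _ (by simp [List.isPrefixOf]),
        pv_count_cons_not_prefix ['r', 'e', ':'] (by simp) _ _ (by simp [List.isPrefixOf]),
        pv_count_cons_not_prefix ['r', 'e', ':'] (by simp) _ _ (by simp [List.isPrefixOf])]
    have h4 : ('f' :: 'w' :: 'd' :: ':' :: r).drop 4 = r := rfl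
    have hd : List.drop (['f', 'w', 'd', ':'].length) ('f' :: 'w' :: 'd' :: ':' :: r) = r := rfl
    rw [h4, hd]
    push_cast
    ring
  | case4 c t count hfw hfwd hre ih =>
    simp only [PySem.Chars.startswith] at hfw hfwd hre
    obtain ⟨r, hr⟩ := List.isPrefixOf_iff_prefix.mp hre
    rw [ih]
    rw [pv_count_cons_prefix ['r', 'e', ':'] (by simp) c t hre]
    have hcw : c = 'r' ∧ t = 'e' :: ':' :: r := by
      have := hr.symm; simp at this; tauto
    obtain ⟨rfl, rfl⟩ := hcw
    rw [pv_count_cons_not_prefix ['f', 'w', ':'] (by simp) _ _ (by simp [List.isPrefixOf]),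
        pv_count_cons_not_prefix ['f', 'w', ':'] (by simp) _ _ (by simp [List.isPrefixOf]),
        pv_count_cons_not_prefix ['f', 'w', ':'] (by simp) _ _ (by simp [List.isPrefixOf]),
        pv_count_cons_not_prefix ['f', 'w', 'd', ':'] (by simp) _ _ (by simp [List.isPrefixOf]),
        pv_count_cons_not_prefix ['f', 'w', 'd', ':'] (by simp) _ _ (by simp [List.isPrefixOf]),
        pv_count_cons_not_prefix ['f', 'w', 'd', ':'] (by simp) _ _ (by simp [List.isPrefixOf])]
    have h3 : ('r' :: 'e' :: ':' :: r).drop 3 = r := rfl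
    have hd : List.drop (['r', 'e', ':'].length) ('r' :: 'e' :: ':' :: r) = r := rfl
    rw [h3, hd]
    push_cast
    ring
  | case5 c t count hfw hfwd hre ih =>
    simp only [PySem.Chars.startswith] at hfw hfwd hre
    rw [ih,
        pv_count_cons_not_prefix ['f', 'w', ':'] (by simp) _ _ hfw,
        pv_count_cons_not_prefix ['f', 'w', 'd', ':'] (by simp) _ _ hfwd,
        pv_count_cons_not_prefix ['r', 'e', ':'] (by simp) _ _ hre]

-- ===== VERDICT (by name: the statement is the Claim_ definition above) =====
theorem email_chain_count_spec : Claim_equal_email_chain_count := by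
  intro subject _
  unfold Spec_email_chain_count email_chain_count email_chain_count_alt
  rw [pv_loop_eq]
  simp [PySem.Str.count_eq]
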